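-- pv_equiv track=rewrite | github.com/iucl/l2-writing-assistant | firstcut/util.py | allsplits
-- ===== SOURCE A (Python) =====
-- def allsplits(ls):
--     """Given a list, return all of the ways to split that list into sublists.
--     For example, given [1,2,3] should return in some order:
--     [[1,2,3]]
--     [[1],[2,3]]
--     [[1,2],3]
--     [[1],[2],[3]]. This is 2^(n-1) elements for an n-item list."""
--
--     if not ls: return []
--     if len(ls) == 1: return [[ls]]
--
--     ## only two possibilities. We split off the first one, or we don't.
--     rest = allsplits(ls[1:])
--     splitfirst = []
--     for way in rest:
--         newway = [[ls[0]]] + way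
--         splitfirst.append(newway)
--
--     dontsplitfirst = []
--     for way in rest:
--         newway = [[ls[0]] + way[0]] + way[1:]
--         dontsplitfirst.append(newway)
--     return splitfirst + dontsplitfirst
-- ===== SOURCE B (Python) =====
-- def allsplits(ls):
--     """All ways to split ls into consecutive sublists, by binary mask
--     enumeration: gap after position j is merged iff bit (n-2-j) of mask is 1."""
--     if not ls:
--         return []
--     x, rest = ls[0], ls[1:]
--     res = []
--     for mask in range(1 << len(rest)):
--         split, cur = [], [x]
--         for j, y in enumerate(rest):
--             shift = len(rest) - 1 - j
--             if (mask >> shift) & 1: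
--                 cur.append(y)
--             else:
--                 split.append(cur)
--                 cur = [y]
--         split.append(cur)
--         res.append(split)
--     return res
-- ===== Notes on version B (the rewrite author's own statement) =====
-- stated objective: alternative
-- what changed: Replaces A's recursion (which doubles the list of splits by split-first/don't-split-first) with an iterative enumeration of bitmasks 0..2^(n-1)-1, decoding each mask into one split in a single left-to-right scan.
import Mathlib
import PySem

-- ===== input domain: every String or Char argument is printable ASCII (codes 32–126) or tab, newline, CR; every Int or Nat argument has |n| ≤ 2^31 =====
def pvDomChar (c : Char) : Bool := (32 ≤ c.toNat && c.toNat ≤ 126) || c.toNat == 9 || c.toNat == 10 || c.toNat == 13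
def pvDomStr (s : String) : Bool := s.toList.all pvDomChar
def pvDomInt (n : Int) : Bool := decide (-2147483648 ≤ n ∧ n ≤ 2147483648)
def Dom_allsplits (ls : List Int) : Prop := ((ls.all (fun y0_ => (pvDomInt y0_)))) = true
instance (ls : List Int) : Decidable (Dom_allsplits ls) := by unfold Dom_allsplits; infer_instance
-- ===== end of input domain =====

-- B replaces A's recursive doubling with an iterative bitmask enumeration (same cost, different algorithm).


-- ===== PORT A =====
-- literal transliteration of A's recursion; 'way[0]'/'way[1:]' become headD []/tail
-- (every 'way' produced by the recursion is nonempty, so Python's way[0] never raises)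
def allsplits : List Int → List (List (List Int))
  | [] => []
  | [x] => [[[x]]]
  | x :: rest =>
    let r := allsplits rest
    let splitfirst := r.map (fun way => [x] :: way)
    let dontsplitfirst := r.map (fun way => ([x] ++ way.headD []) :: way.tail)
    splitfirst ++ dontsplitfirst

-- ===== PORT B =====
-- inner loop of Source B: state (split, cur); for element y with tail t after it,
-- the Python shift 'len(rest)-1-j' is exactly t.length
def allsplitsGo (mask : Nat) : List (List Int) → List Int → List Int → List (List Int)
  | split, cur, [] => split ++ [cur]
  | split, cur, y :: t =>
    if mask.testBit t.length then allsplitsGo mask split (cur ++ [y]) t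
    else allsplitsGo mask (split ++ [cur]) [y] t

def allsplits_alt (ls : List Int) : List (List (List Int)) :=
  match ls with
  | [] => []
  | x :: rest => (List.range (2 ^ rest.length)).map (fun mask => allsplitsGo mask [] [x] rest)

-- ===== PRECONDITION & SPEC =====
def Spec_allsplits (ls : List Int) (out : List (List (List Int))) : Prop := out = allsplits_alt ls
instance (ls : List Int) (out : List (List (List Int))) : Decidable (Spec_allsplits ls out) := by unfold Spec_allsplits; infer_instance

-- ===== CLAIM (what is proved, stated in full; the proofs are below) =====
def Claim_equal_allsplits : Prop := ∀ (ls : List Int), Dom_allsplits ls → Spec_allsplits ls (allsplits ls)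

-- ===== LEMMAS AND PROOFS =====

-- the accumulated 'split' prefix factors out of the loop
theorem go_split (mask : Nat) (t : List Int) : ∀ (split : List (List Int)) (cur : List Int),
    allsplitsGo mask split cur t = split ++ allsplitsGo mask [] cur t := by
  induction t with
  | nil => intro split cur; simp [allsplitsGo]
  | cons y t ih =>
    intro split cur
    simp only [allsplitsGo]
    split_ifs
    · rw [ih split, ih []]
    · rw [ih (split ++ [cur]), ih ([] ++ [cur])]; simp

-- prepending 'a' to the starting current sublist prepends it to the head of the result
theorem go_prefix (mask : Nat) (t : List Int) : ∀ (cur a : List Int),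
    allsplitsGo mask [] (a ++ cur) t =
      (a ++ (allsplitsGo mask [] cur t).headD []) :: (allsplitsGo mask [] cur t).tail := by
  induction t with
  | nil => intro cur a; simp [allsplitsGo]
  | cons y t ih =>
    intro cur a
    simp only [allsplitsGo]
    split_ifs
    · rw [show (a ++ cur) ++ [y] = a ++ (cur ++ [y]) by simp, ih (cur ++ [y]) a]
    · simp only [List.nil_append]
      rw [go_split mask t [a ++ cur], go_split mask t [cur]]
      simp

-- the loop only reads bits below t.length of the mask
theorem go_bits (t : List Int) : ∀ (mask₁ mask₂ : Nat) (cur : List Int),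
    (∀ k, k < t.length → mask₁.testBit k = mask₂.testBit k) →
    allsplitsGo mask₁ [] cur t = allsplitsGo mask₂ [] cur t := by
  induction t with
  | nil => intro _ _ _ _; simp [allsplitsGo]
  | cons y t ih =>
    intro mask₁ mask₂ cur h
    have hb : mask₁.testBit t.length = mask₂.testBit t.length := h _ (by simp)
    simp only [allsplitsGo, hb]
    split_ifs
    · exact ih _ _ _ (fun k hk => h k (by simp; omega))
    · rw [go_split mask₁, go_split mask₂, ih _ _ _ (fun k hk => h k (by simp; omega))]

-- main correspondence: A's recursion = mask enumeration, for nonempty input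
theorem allsplits_cons (rest : List Int) : ∀ (x : Int),
    allsplits (x :: rest) =
      (List.range (2 ^ rest.length)).map (fun mask => allsplitsGo mask [] [x] rest) := by
  induction rest with
  | nil => intro x; rfl
  | cons y t ih =>
    intro x
    have hsplit : List.range (2 ^ (y :: t).length) =
        List.range (2 ^ t.length) ++ (List.range (2 ^ t.length)).map (2 ^ t.length + ·) := by
      have : 2 ^ (y :: t).length = 2 ^ t.length + 2 ^ t.length := by
        simp [pow_succ]; ring
      rw [this, List.range_add]
    rw [hsplit, List.map_append, List.map_map]
    show allsplits (x :: y :: t) = _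
    simp only [allsplits, ih]
    congr 1
    · rw [List.map_map]
      apply List.map_congr_left
      intro mask hm
      simp only [Function.comp_apply]
      have hlt : mask < 2 ^ t.length := List.mem_range.mp hm
      have hbit : mask.testBit t.length = false := Nat.testBit_lt_two_pow hlt
      simp only [allsplitsGo, hbit]
      rw [if_neg (by simp)]
      simp only [List.nil_append]
      rw [go_split mask t [[x]]]
      simp
    · rw [List.map_map]
      apply List.map_congr_left
      intro mask hm
      simp only [Function.comp_apply]
      have hlt : mask < 2 ^ t.length := List.mem_range.mp hm
      have hbit : (2 ^ t.length + mask).testBit t.length = true := by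
        rw [Nat.testBit_two_pow_add_eq, Nat.testBit_lt_two_pow hlt]; rfl
      simp only [allsplitsGo, hbit]
      rw [if_pos trivial,
          go_bits t (2 ^ t.length + mask) mask _
            (fun k hk => Nat.testBit_two_pow_add_gt hk mask),
          show ([x] ++ [y] : List Int) = [x] ++ [y] from rfl, go_prefix]

-- ===== VERDICT (by name: the statement is the Claim_ definition above) =====
theorem allsplits_spec : Claim_equal_allsplits := by
  intro ls _
  unfold Spec_allsplits
  cases ls with
  | nil => rfl
  | cons x rest => rw [allsplits_cons]; rfl
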